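-- pv_equiv track=rewrite | github.com/rebmid/Reasoning-Agent-Azure-Landing-Zone-Assessment-Advisor | engine/id_rewriter.py | _resolve_control_id
-- ===== SOURCE A (Python) =====
-- def _resolve_control_id(raw_id: str, canonical_keys: set[str]) -> tuple[str, str]:
--     """Resolve a single raw control ID to its canonical form.
--
--     Returns
--     -------
--     tuple[str, str]
--         (resolved_id, status) where status is one of:
--         - "exact"    — already canonical
--         - "prefix"   — resolved via prefix match
--         - "reject"   — no match or ambiguous match
--     """
--     # 1. Exact match
--     if raw_id in canonical_keys:
--         return raw_id, "exact"
--
--     # 2. Prefix match — the canonical keys may be 8-char truncated GUIDs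
--     #    or longer names like "vnet-peering-001".
--     #    Strategy A: raw_id[:8] matches a canonical key exactly.
--     prefix = raw_id[:8]
--     matches = [k for k in canonical_keys if k == prefix]
--     if len(matches) == 1:
--         return matches[0], "prefix"
--
--     # 3. Substring prefix — a canonical key starts with the raw_id
--     #    (e.g., raw_id="vnet-peer" → canonical "vnet-peering-001")
--     starts_matches = [k for k in canonical_keys if k.startswith(raw_id)]
--     if len(starts_matches) == 1:
--         return starts_matches[0], "prefix"
--
--     # 4. Reverse prefix — the raw_id starts with a canonical key
--     #    (e.g., raw_id="defender-assessments-001-extra" → "defender-assessments-001")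
--     reverse_matches = [k for k in canonical_keys if raw_id.startswith(k)]
--     if len(reverse_matches) == 1:
--         return reverse_matches[0], "prefix"
--
--     # 5. Fuzzy: canonical key starts with raw_id[:8]
--     #    (e.g., raw_id="policy-e" → match "policy-exemptions-001")
--     fuzzy_matches = [k for k in canonical_keys if k.startswith(prefix)]
--     if len(fuzzy_matches) == 1:
--         return fuzzy_matches[0], "prefix"
--
--     # 6. Name-based: match by common word fragments for short partial IDs
--     #    (e.g., raw_id="ddos-prot" → match control with "ddos" in key)
--     if len(raw_id) >= 4:
--         word = raw_id.split("-")[0].lower()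
--         word_matches = [k for k in canonical_keys if word in k.lower()]
--         if len(word_matches) == 1:
--             return word_matches[0], "prefix"
--
--     # 7. No match
--     return raw_id, "reject"
-- ===== SOURCE B (Python) =====
-- def _resolve_control_id(raw_id: str, canonical_keys: set[str]) -> tuple[str, str]:
--     """One pass over canonical_keys filling all match buckets, then one decision phase."""
--     prefix = raw_id[:8]
--     word = raw_id.split("-")[0].lower() if len(raw_id) >= 4 else None
--     exact = False
--     b1, b2, b3, b4, b5 = [], [], [], [], []
--     for k in canonical_keys:
--         if k == raw_id:
--             exact = True
--         if k == prefix: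
--             b1.append(k)
--         if k.startswith(raw_id):
--             b2.append(k)
--         if raw_id.startswith(k):
--             b3.append(k)
--         if k.startswith(prefix):
--             b4.append(k)
--         if word is not None and word in k.lower():
--             b5.append(k)
--     if exact:
--         return raw_id, "exact"
--     for bucket in (b1, b2, b3, b4, b5):
--         if len(bucket) == 1:
--             return bucket[0], "prefix"
--     return raw_id, "reject"
-- ===== Notes on version B (the rewrite author's own statement) =====
-- stated objective: alternative
-- what changed: A's membership test plus five separate comprehension scans over canonical_keys (with early returns between them) are fused into one loop that fills an exact flag and five match buckets simultaneously, followed by a scan-free decision phase applying the same priority order.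
import Mathlib
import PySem

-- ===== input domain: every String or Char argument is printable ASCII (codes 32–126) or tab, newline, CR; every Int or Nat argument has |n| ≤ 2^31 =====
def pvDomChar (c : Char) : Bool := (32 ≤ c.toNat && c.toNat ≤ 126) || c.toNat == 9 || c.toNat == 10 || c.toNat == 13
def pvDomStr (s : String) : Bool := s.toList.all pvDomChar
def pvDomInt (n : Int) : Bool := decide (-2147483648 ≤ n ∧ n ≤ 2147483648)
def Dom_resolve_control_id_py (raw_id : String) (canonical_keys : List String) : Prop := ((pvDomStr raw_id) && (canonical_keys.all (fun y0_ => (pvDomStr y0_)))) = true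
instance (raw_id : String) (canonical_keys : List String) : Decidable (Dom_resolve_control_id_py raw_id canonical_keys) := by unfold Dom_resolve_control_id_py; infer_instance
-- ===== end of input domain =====

-- B replaces A's five separate scans over canonical_keys (plus a membership test) by ONE pass
-- filling six collectors, followed by a scan-free decision phase (objective: alternative).
-- `canonical_keys` is a Python set; buckets are only used when they hold exactly one element,
-- so iteration order never affects the result.

-- ===== PORT A =====
def resolve_control_id_py (raw_id : String) (canonical_keys : List String) : String × String :=
  if canonical_keys.contains raw_id then (raw_id, "exact")
  else
    let pfx := PySem.Str.slice raw_id none (some 8)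
    let matchesM := canonical_keys.filter (fun k => k == pfx)
    if matchesM.length == 1 then (matchesM.getD 0 "", "prefix")
    else
      let startsM := canonical_keys.filter (fun k => PySem.Str.startswith k raw_id)
      if startsM.length == 1 then (startsM.getD 0 "", "prefix")
      else
        let reverseM := canonical_keys.filter (fun k => PySem.Str.startswith raw_id k)
        if reverseM.length == 1 then (reverseM.getD 0 "", "prefix")
        else
          let fuzzyM := canonical_keys.filter (fun k => PySem.Str.startswith k pfx)
          if fuzzyM.length == 1 then (fuzzyM.getD 0 "", "prefix")
          else
            if 4 ≤ PySem.Str.len raw_id then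
              let word := PySem.Str.lower (((PySem.Str.split? raw_id "-").getD []).getD 0 "")
              let wordM := canonical_keys.filter (fun k => PySem.Str.isIn word (PySem.Str.lower k))
              if wordM.length == 1 then (wordM.getD 0 "", "prefix")
              else (raw_id, "reject")
            else (raw_id, "reject")

-- ===== PORT B =====
-- state: (exact flag, b1, b2, b3, b4, b5) — six collectors of B's single loop
def rcStep (raw_id pfx : String) (word? : Option String)
    (st : Bool × List String × List String × List String × List String × List String)
    (k : String) : Bool × List String × List String × List String × List String × List String :=
  let (ex, b1, b2, b3, b4, b5) := st
  (ex || (k == raw_id),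
   if k == pfx then b1 ++ [k] else b1,
   if PySem.Str.startswith k raw_id then b2 ++ [k] else b2,
   if PySem.Str.startswith raw_id k then b3 ++ [k] else b3,
   if PySem.Str.startswith k pfx then b4 ++ [k] else b4,
   if word?.elim false (fun w => PySem.Str.isIn w (PySem.Str.lower k)) then b5 ++ [k] else b5)

def resolve_control_id_py_alt (raw_id : String) (canonical_keys : List String) : String × String :=
  let pfx := PySem.Str.slice raw_id none (some 8)
  let word? := if 4 ≤ PySem.Str.len raw_id
               then some (PySem.Str.lower (((PySem.Str.split? raw_id "-").getD []).getD 0 "")) else none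
  let (ex, b1, b2, b3, b4, b5) :=
    canonical_keys.foldl (rcStep raw_id pfx word?) (false, [], [], [], [], [])
  if ex then (raw_id, "exact")
  else if b1.length == 1 then (b1.getD 0 "", "prefix")
  else if b2.length == 1 then (b2.getD 0 "", "prefix")
  else if b3.length == 1 then (b3.getD 0 "", "prefix")
  else if b4.length == 1 then (b4.getD 0 "", "prefix")
  else if b5.length == 1 then (b5.getD 0 "", "prefix")
  else (raw_id, "reject")

-- ===== PRECONDITION & SPEC =====
def Spec_resolve_control_id_py (raw_id : String) (canonical_keys : List String) (out : String × String) : Prop := out = resolve_control_id_py_alt raw_id canonical_keys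
instance (raw_id : String) (canonical_keys : List String) (out : String × String) : Decidable (Spec_resolve_control_id_py raw_id canonical_keys out) := by unfold Spec_resolve_control_id_py; infer_instance

-- ===== CLAIM (what is proved, stated in full; the proofs are below) =====
def Claim_equal_resolve_control_id_py : Prop := ∀ (raw_id : String) (canonical_keys : List String), Dom_resolve_control_id_py raw_id canonical_keys → Spec_resolve_control_id_py raw_id canonical_keys (resolve_control_id_py raw_id canonical_keys)

-- ===== LEMMAS AND PROOFS =====

lemma rcStep_fold (raw_id pfx : String) (word? : Option String) :
    ∀ (xs : List String) (ex : Bool) (l1 l2 l3 l4 l5 : List String),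
    xs.foldl (rcStep raw_id pfx word?) (ex, l1, l2, l3, l4, l5) =
      (ex || xs.any (fun k => k == raw_id),
       l1 ++ xs.filter (fun k => k == pfx),
       l2 ++ xs.filter (fun k => PySem.Str.startswith k raw_id),
       l3 ++ xs.filter (fun k => PySem.Str.startswith raw_id k),
       l4 ++ xs.filter (fun k => PySem.Str.startswith k pfx),
       l5 ++ xs.filter (fun k => word?.elim false (fun w => PySem.Str.isIn w (PySem.Str.lower k)))) := by
  intro xs
  induction xs with
  | nil => intro ex l1 l2 l3 l4 l5; simp
  | cons x t ih =>
    intro ex l1 l2 l3 l4 l5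
    simp only [List.foldl_cons, rcStep, List.any_cons, List.filter_cons]
    rw [ih]
    split_ifs <;> simp [Bool.or_assoc]

lemma contains_eq_any (raw_id : String) (xs : List String) :
    xs.contains raw_id = xs.any (fun k => k == raw_id) := by
  rw [List.any_beq']

-- ===== VERDICT (by name: the statement is the Claim_ definition above) =====
theorem resolve_control_id_py_spec : Claim_equal_resolve_control_id_py := by
  intro raw_id canonical_keys _
  unfold Spec_resolve_control_id_py resolve_control_id_py resolve_control_id_py_alt
  simp only [rcStep_fold, Bool.false_or, List.nil_append, ← contains_eq_any]
  by_cases h4 : 4 ≤ PySem.Str.len raw_id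
  · simp only [if_pos h4, Option.elim]
  · simp only [if_neg h4, Option.elim, List.filter_false, List.length_nil]
    split <;> [rfl; skip]
    split <;> [rfl; skip]
    split <;> [rfl; skip]
    split <;> [rfl; skip]
    split <;> rfl
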